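-- pv_equiv track=rewrite | github.com/alexandraback/datacollection | solutions_5639104758808576_1/Python/Jakube/problemA.py | compute
-- ===== SOURCE A (Python) =====
-- def compute(people_count):
--     people_necessary = 0
--     count = 0
--
--     for shyness_level, people in enumerate(people_count):
--         if count < shyness_level:
--             people_necessary += shyness_level - count
--             count = shyness_level
--         count += people
--
--     return people_necessary
-- ===== SOURCE B (Python) =====
-- def compute(people_count):
--     prefixes = []
--     total = 0
--     for people in people_count:
--         prefixes.append(total)
--         total += people
--     deficits = [i - s for i, s in enumerate(prefixes)]
--     return max(deficits, default=0)
-- ===== Notes on version B (the rewrite author's own statement) =====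
-- stated objective: alternative
-- what changed: B replaces A's conditional top-up accumulator with a table-then-reduce: it builds the list of prefix sums, maps each index to its deficit i - prefix, and returns the maximum deficit (0 for the empty list).
import Mathlib
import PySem

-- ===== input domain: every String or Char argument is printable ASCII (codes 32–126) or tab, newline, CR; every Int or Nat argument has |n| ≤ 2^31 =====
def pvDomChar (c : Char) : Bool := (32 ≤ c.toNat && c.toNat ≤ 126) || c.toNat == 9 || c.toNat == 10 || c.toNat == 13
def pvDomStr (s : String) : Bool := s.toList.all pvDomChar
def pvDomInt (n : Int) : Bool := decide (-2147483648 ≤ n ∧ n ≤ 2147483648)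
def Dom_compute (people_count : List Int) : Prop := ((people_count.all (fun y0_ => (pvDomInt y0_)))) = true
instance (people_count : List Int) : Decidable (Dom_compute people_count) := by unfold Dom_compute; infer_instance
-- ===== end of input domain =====

-- ===== PORT A =====
-- B returns the maximum index-vs-prefix-sum deficit over a precomputed prefix table instead of A's conditional top-up accumulator (objective: alternative).
-- Python for-loop over enumerate(people_count): recursion carrying (people_necessary, count, index).
def computeLoop : List Int → Int → Int → Int → Int
  | [], nec, _, _ => nec
  | people :: rest, nec, count, i =>
      if count < i then computeLoop rest (nec + (i - count)) (i + people) (i + 1)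
      else computeLoop rest nec (count + people) (i + 1)

def compute (people_count : List Int) : Int := computeLoop people_count 0 0 0

-- ===== PORT B =====
-- the prefix-building loop of Source B
def prefixList : List Int → Int → List Int
  | [], _ => []
  | people :: rest, total => total :: prefixList rest (total + people)

def compute_alt (people_count : List Int) : Int :=
  let deficits := ((prefixList people_count 0).zipIdx.map (fun p => (p.2 : Int) - p.1))
  match deficits with
  | [] => 0
  | d :: ds => ds.foldl max d

-- ===== PRECONDITION & SPEC =====
def Spec_compute (people_count : List Int) (out : Int) : Prop := out = compute_alt people_count
instance (people_count : List Int) (out : Int) : Decidable (Spec_compute people_count out) := by unfold Spec_compute; infer_instance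

-- ===== CLAIM (what is proved, stated in full; the proofs are below) =====
def Claim_equal_compute : Prop := ∀ (people_count : List Int), Dom_compute people_count → Spec_compute people_count (compute people_count)

-- ===== LEMMAS AND PROOFS =====
-- common reference: running maximum of deficits (i - prefix sum), seeded with m
def maxDef : List Int → Nat → Int → Int → Int
  | [], _, _, m => m
  | people :: rest, i, s, m => maxDef rest (i + 1) (s + people) (max m ((i : Int) - s))

theorem computeLoop_eq_maxDef (l : List Int) : ∀ (i : Nat) (s nec : Int),
    computeLoop l nec (s + nec) (i : Int) = maxDef l i s nec := by
  induction l with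
  | nil => intro i s nec; rfl
  | cons p rest ih =>
    intro i s nec
    simp only [computeLoop, maxDef]
    by_cases h : s + nec < (i : Int)
    · rw [if_pos h]
      have h1 : (i : Int) + p = (s + p) + ((i : Int) - s) := by ring
      have h2 : nec + ((i : Int) - (s + nec)) = (i : Int) - s := by ring
      have h3 : max nec ((i : Int) - s) = (i : Int) - s := by omega
      rw [h1, h2, h3]
      have := ih (i + 1) (s + p) ((i : Int) - s)
      simpa using this
    · rw [if_neg h]
      have h3 : max nec ((i : Int) - s) = nec := by omega
      rw [h3]
      have h1 : s + nec + p = (s + p) + nec := by ring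
      rw [h1]
      have := ih (i + 1) (s + p) nec
      simpa using this

theorem foldl_eq_maxDef (l : List Int) : ∀ (i : Nat) (s m : Int),
    (((prefixList l s).zipIdx i).map (fun p => (p.2 : Int) - p.1)).foldl max m = maxDef l i s m := by
  induction l with
  | nil => intro i s m; rfl
  | cons p rest ih =>
    intro i s m
    simp only [prefixList, List.zipIdx_cons, List.map_cons, List.foldl_cons, maxDef]
    exact ih (i + 1) (s + p) (max m ((i : Int) - s))

-- ===== VERDICT (by name: the statement is the Claim_ definition above) =====
theorem compute_spec : Claim_equal_compute := by
  intro l _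
  show compute l = compute_alt l
  cases l with
  | nil => rfl
  | cons p rest =>
    have hA := computeLoop_eq_maxDef (p :: rest) 0 0 0
    simp only [Nat.cast_zero, add_zero] at hA
    have hB := foldl_eq_maxDef rest 1 p 0
    show computeLoop (p :: rest) 0 0 0 = _
    rw [hA]
    simp only [compute_alt, prefixList, List.zipIdx_cons, List.map_cons, Nat.cast_zero,
      sub_zero, maxDef, zero_add, zero_sub, neg_zero, max_self]
    simpa using hB.symm
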